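-- pv_equiv track=rewrite | github.com/Seyyyeddd/executive-ai-assistant | telegram_ui/interrupt_client.py | normalize_action_type
-- ===== SOURCE A (Python) =====
-- INTERRUPT_TYPES = {
--     "Question": {
--         "description": "A question that requires a direct answer",
--         "allowed_responses": ["response", "ignore"],
--         "handler_function": "send_message"
--     },
--     "ResponseEmailDraft": {
--         "description": "A draft email requiring approval, edits, or rejection",
--         "allowed_responses": ["accept", "edit", "ignore", "response"],
--         "handler_function": "send_email_draft"
--     },
--     "Notify": {
--         "description": "A notification requiring acknowledgment or response",
--         "allowed_responses": ["response", "ignore"],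
--         "handler_function": "notify"
--     },
--     "SendCalendarInvite": {
--         "description": "A calendar invite requiring approval, edits, or rejection",
--         "allowed_responses": ["accept", "edit", "ignore", "response"],
--         "handler_function": "send_cal_invite"
--     }
-- }
--
-- def normalize_action_type(action_type: str) -> str:
--     """
--     Normalize action type to match our INTERRUPT_TYPES dictionary.
--     Handles case sensitivity and common name variations.
--     """
--     # Handle empty or unknown values
--     if not action_type or action_type == "Unknown":
--         return "Unknown"
--
--     # Direct match (no changes needed)
--     if action_type in INTERRUPT_TYPES:
--         return action_type
--
--     # Case-insensitive match
--     action_lower = action_type.lower()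
--     for interrupt_type in INTERRUPT_TYPES:
--         if interrupt_type.lower() == action_lower:
--             return interrupt_type
--
--     # Handle common variations
--     if action_lower == "question":
--         return "Question"
--     elif action_lower in ["email", "responseemaildraft", "emaildraft"]:
--         return "ResponseEmailDraft"
--     elif action_lower == "notify":
--         return "Notify"
--     elif action_lower in ["invite", "calendar", "sendcalendarinvite"]:
--         return "SendCalendarInvite"
--
--     # If no match, return as is
--     return action_type
-- ===== SOURCE B (Python) =====
-- _ALIASES = {
--     "question": "Question",
--     "responseemaildraft": "ResponseEmailDraft",
--     "notify": "Notify",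
--     "sendcalendarinvite": "SendCalendarInvite",
--     "email": "ResponseEmailDraft",
--     "emaildraft": "ResponseEmailDraft",
--     "invite": "SendCalendarInvite",
--     "calendar": "SendCalendarInvite",
-- }
--
--
-- def normalize_action_type(action_type: str) -> str:
--     if not action_type or action_type == "Unknown":
--         return "Unknown"
--     return _ALIASES.get(action_type.lower(), action_type)
-- ===== Notes on version B (the rewrite author's own statement) =====
-- stated objective: simpler
-- what changed: Replaced the exact-membership check, the case-insensitive scan over INTERRUPT_TYPES and the elif alias cascade by a single precomputed lowercase-alias dict lookup with the original string as default.
import Mathlib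
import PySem

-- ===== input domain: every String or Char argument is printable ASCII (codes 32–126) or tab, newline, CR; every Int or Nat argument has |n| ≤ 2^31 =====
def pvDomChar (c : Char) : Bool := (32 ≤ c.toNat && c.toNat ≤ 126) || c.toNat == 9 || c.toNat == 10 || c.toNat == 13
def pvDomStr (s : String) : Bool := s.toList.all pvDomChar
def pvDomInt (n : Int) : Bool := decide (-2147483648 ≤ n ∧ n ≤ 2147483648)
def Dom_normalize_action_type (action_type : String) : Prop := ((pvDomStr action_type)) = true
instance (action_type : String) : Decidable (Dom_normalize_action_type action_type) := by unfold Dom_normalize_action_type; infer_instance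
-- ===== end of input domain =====

-- B replaces A's key scan and elif alias cascade by one precomputed alias-dict lookup (objective: simpler).

-- ===== PORT A =====
-- the keys of INTERRUPT_TYPES, in dict insertion order
def interruptKeys : List String := ["Question", "ResponseEmailDraft", "Notify", "SendCalendarInvite"]

-- the 'for interrupt_type in INTERRUPT_TYPES' loop with early return
def findCaseInsensitive : List String → String → Option String
  | [], _ => none
  | k :: rest, l => if PySem.Str.lower k = l then some k else findCaseInsensitive rest l

def normalize_action_type (action_type : String) : String :=
  if action_type = "" ∨ action_type = "Unknown" then "Unknown"
  else if interruptKeys.contains action_type then action_type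
  else
    let action_lower := PySem.Str.lower action_type
    match findCaseInsensitive interruptKeys action_lower with
    | some k => k
    | none =>
      if action_lower = "question" then "Question"
      else if action_lower = "email" ∨ action_lower = "responseemaildraft" ∨ action_lower = "emaildraft" then "ResponseEmailDraft"
      else if action_lower = "notify" then "Notify"
      else if action_lower = "invite" ∨ action_lower = "calendar" ∨ action_lower = "sendcalendarinvite" then "SendCalendarInvite"
      else action_type

-- ===== PORT B =====
def aliasDict : PySem.Dict String String := PySem.Dict.ofList
  [("question", "Question"),
   ("responseemaildraft", "ResponseEmailDraft"),
   ("notify", "Notify"),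
   ("sendcalendarinvite", "SendCalendarInvite"),
   ("email", "ResponseEmailDraft"),
   ("emaildraft", "ResponseEmailDraft"),
   ("invite", "SendCalendarInvite"),
   ("calendar", "SendCalendarInvite")]

def normalize_action_type_alt (action_type : String) : String :=
  if action_type = "" ∨ action_type = "Unknown" then "Unknown"
  else aliasDict.getD (PySem.Str.lower action_type) action_type

-- ===== PRECONDITION & SPEC =====
def Spec_normalize_action_type (action_type : String) (out : String) : Prop := out = normalize_action_type_alt action_type
instance (action_type : String) (out : String) : Decidable (Spec_normalize_action_type action_type out) := by unfold Spec_normalize_action_type; infer_instance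

-- ===== CLAIM (what is proved, stated in full; the proofs are below) =====
def Claim_equal_normalize_action_type : Prop := ∀ (action_type : String), Dom_normalize_action_type action_type → Spec_normalize_action_type action_type (normalize_action_type action_type)

-- ===== LEMMAS AND PROOFS =====

-- s ≠ k when their lowercasings must differ
theorem ne_of_lower_eq {s k l0 : String} (h : PySem.Str.lower s = l0)
    (hk : PySem.Str.lower k ≠ l0) : s ≠ k := by
  rintro rfl; exact hk h

theorem lowQ : PySem.Str.lower "Question" = "question" := by decide
theorem lowR : PySem.Str.lower "ResponseEmailDraft" = "responseemaildraft" := by decide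
theorem lowN : PySem.Str.lower "Notify" = "notify" := by decide
theorem lowC : PySem.Str.lower "SendCalendarInvite" = "sendcalendarinvite" := by decide

theorem aliasDict_mk : aliasDict = PySem.Dict.mk
  [("question", "Question"),
   ("responseemaildraft", "ResponseEmailDraft"),
   ("notify", "Notify"),
   ("sendcalendarinvite", "SendCalendarInvite"),
   ("email", "ResponseEmailDraft"),
   ("emaildraft", "ResponseEmailDraft"),
   ("invite", "SendCalendarInvite"),
   ("calendar", "SendCalendarInvite")] := by decide

theorem key_eq (s : String) : normalize_action_type s = normalize_action_type_alt s := by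
  by_cases hg : s = "" ∨ s = "Unknown"
  · simp [normalize_action_type, normalize_action_type_alt, hg]
  · by_cases h1 : PySem.Str.lower s = "question"
    · by_cases hQ : s = "Question"
      · subst hQ; decide
      · have hR : s ≠ "ResponseEmailDraft" := ne_of_lower_eq h1 (by decide)
        have hN : s ≠ "Notify" := ne_of_lower_eq h1 (by decide)
        have hC : s ≠ "SendCalendarInvite" := ne_of_lower_eq h1 (by decide)
        simp [normalize_action_type, normalize_action_type_alt, hg, interruptKeys,
          findCaseInsensitive, aliasDict_mk, PySem.Dict.get?_mk_cons,
          PySem.Dict.getD_eq_get?_getD, lowQ, h1, hQ, hR, hN, hC]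
    · by_cases h2 : PySem.Str.lower s = "responseemaildraft"
      · by_cases hR : s = "ResponseEmailDraft"
        · subst hR; decide
        · have hQ : s ≠ "Question" := ne_of_lower_eq h2 (by decide)
          have hN : s ≠ "Notify" := ne_of_lower_eq h2 (by decide)
          have hC : s ≠ "SendCalendarInvite" := ne_of_lower_eq h2 (by decide)
          simp [normalize_action_type, normalize_action_type_alt, hg, interruptKeys,
            findCaseInsensitive, aliasDict_mk, PySem.Dict.get?_mk_cons,
            PySem.Dict.getD_eq_get?_getD, lowQ, lowR, h2, hQ, hR, hN, hC]
      · by_cases h3 : PySem.Str.lower s = "notify"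
        · by_cases hN : s = "Notify"
          · subst hN; decide
          · have hQ : s ≠ "Question" := ne_of_lower_eq h3 (by decide)
            have hR : s ≠ "ResponseEmailDraft" := ne_of_lower_eq h3 (by decide)
            have hC : s ≠ "SendCalendarInvite" := ne_of_lower_eq h3 (by decide)
            simp [normalize_action_type, normalize_action_type_alt, hg, interruptKeys,
              findCaseInsensitive, aliasDict_mk, PySem.Dict.get?_mk_cons,
              PySem.Dict.getD_eq_get?_getD, lowQ, lowR, lowN, h3, hQ, hR, hN, hC]
        · by_cases h4 : PySem.Str.lower s = "sendcalendarinvite"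
          · by_cases hC : s = "SendCalendarInvite"
            · subst hC; decide
            · have hQ : s ≠ "Question" := ne_of_lower_eq h4 (by decide)
              have hR : s ≠ "ResponseEmailDraft" := ne_of_lower_eq h4 (by decide)
              have hN : s ≠ "Notify" := ne_of_lower_eq h4 (by decide)
              simp [normalize_action_type, normalize_action_type_alt, hg, interruptKeys,
                findCaseInsensitive, aliasDict_mk, PySem.Dict.get?_mk_cons,
                PySem.Dict.getD_eq_get?_getD, lowQ, lowR, lowN, lowC, h4, hQ, hR, hN, hC]
          · have hQ : s ≠ "Question" := fun e => h1 (by rw [e]; decide)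
            have hR : s ≠ "ResponseEmailDraft" := fun e => h2 (by rw [e]; decide)
            have hN : s ≠ "Notify" := fun e => h3 (by rw [e]; decide)
            have hC : s ≠ "SendCalendarInvite" := fun e => h4 (by rw [e]; decide)
            by_cases h5 : PySem.Str.lower s = "email"
            <;> by_cases h6 : PySem.Str.lower s = "emaildraft"
            <;> by_cases h7 : PySem.Str.lower s = "invite"
            <;> by_cases h8 : PySem.Str.lower s = "calendar"
            <;> simp [normalize_action_type, normalize_action_type_alt, hg, interruptKeys,
                  findCaseInsensitive, aliasDict_mk, PySem.Dict.get?_mk_cons,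
                  PySem.Dict.getD_eq_get?_getD, lowQ, lowR, lowN, lowC,
                  h1, h2, h3, h4, h5, h6, h7, h8, Ne.symm h1, Ne.symm h2, Ne.symm h3,
                  Ne.symm h4, hQ, hR, hN, hC]
            rw [if_neg (Ne.symm h5), if_neg (Ne.symm h6), if_neg (Ne.symm h7),
              if_neg (Ne.symm h8)]
            simp [PySem.Dict.get?]

-- ===== VERDICT (by name: the statement is the Claim_ definition above) =====
theorem normalize_action_type_spec : Claim_equal_normalize_action_type := by
  intro s _
  exact key_eq s
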